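-- pv_equiv track=rewrite | github.com/Lyrositor/moul-scripts | Python/bhroBahroYeeshaCave.py | AreListsEquiv
-- ===== SOURCE A (Python) =====
-- import copy
--
-- def AreListsEquiv(list1, list2):
--     if list1[0] in list2 and len(list1) == len(list2):
--         # rearrange list
--         list2Copy = copy.copy(list2)
--         while list2Copy[0] != list1[0]:
--             list2Copy.append(list2Copy.pop(0))
--
--         # check if all values match up now
--         for i in range(4):
--             if list2Copy[i] != list1[i]:
--                 return False
--         return True
--
--     return False
-- ===== SOURCE B (Python) =====
-- def AreListsEquiv(list1, list2):
--     if list1[0] in list2 and len(list1) == len(list2):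
--         k = list2.index(list1[0])
--         rotated = list2[k:] + list2[:k]
--         return rotated[:4] == list1[:4]
--     return False
-- ===== Notes on version B (the rewrite author's own statement) =====
-- stated objective: simpler
-- what changed: Replaces the destructive pop(0)/append rotation loop and the index-by-index range(4) comparison with a single index-and-slice rotation (list2[k:]+list2[:k]) compared to list1 by 4-prefix slice equality.
import Mathlib
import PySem

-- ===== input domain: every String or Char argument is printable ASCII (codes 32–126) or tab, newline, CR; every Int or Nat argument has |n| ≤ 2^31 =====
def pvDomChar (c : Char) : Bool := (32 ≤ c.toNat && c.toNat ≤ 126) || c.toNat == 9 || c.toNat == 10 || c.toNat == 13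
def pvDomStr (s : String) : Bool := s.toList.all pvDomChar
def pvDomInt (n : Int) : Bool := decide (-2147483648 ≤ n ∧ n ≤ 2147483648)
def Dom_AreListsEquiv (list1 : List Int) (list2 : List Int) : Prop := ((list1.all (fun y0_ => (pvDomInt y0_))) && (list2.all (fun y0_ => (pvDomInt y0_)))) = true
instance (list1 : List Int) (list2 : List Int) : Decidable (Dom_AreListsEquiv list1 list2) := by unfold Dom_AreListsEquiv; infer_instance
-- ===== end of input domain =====

-- B replaces A's destructive pop/append rotation loop and index-wise range(4) scan by an
-- index-and-slice rotation compared via 4-prefix slices (objective: simpler).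


-- ===== PORT A =====
-- A's while loop: rotate until the head equals target.  fuel only makes the recursion
-- total; with target ∈ l and fuel = l.length it never runs out.
def rotLoop (target : Int) (l : List Int) (fuel : Nat) : List Int :=
  match fuel, l with
  | 0, _ => l
  | _+1, [] => l
  | fuel+1, x :: rest => if x ≠ target then rotLoop target (rest ++ [x]) fuel else x :: rest

-- A's 'for i in range(4)' comparison; pyGet? none = IndexError (excluded by Pre_, port returns false there)
def cmp4 (list1 l2 : List Int) (i : Nat) : Bool :=
  if i < 4 then
    match PySem.List.pyGet? l2 (i : Int), PySem.List.pyGet? list1 (i : Int) with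
    | some a, some b => if a ≠ b then false else cmp4 list1 l2 (i + 1)
    | _, _ => false
  else true
termination_by 4 - i

def AreListsEquiv (list1 : List Int) (list2 : List Int) : Bool :=
  match list1 with
  | [] => false   -- Python raises IndexError on list1[0]; excluded by Pre_
  | x :: _ =>
    if list2.contains x && (list1.length == list2.length) then
      cmp4 list1 (rotLoop x list2 list2.length) 0
    else false

-- ===== PORT B =====
def AreListsEquiv_alt (list1 : List Int) (list2 : List Int) : Bool :=
  match list1 with
  | [] => false
  | x :: _ =>
    if list2.contains x && (list1.length == list2.length) then
      let k : Nat := (PySem.List.index? list2 x).getD 0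
      let rotated := PySem.List.slice list2 (some (k : Int)) none ++ PySem.List.slice list2 none (some (k : Int))
      PySem.List.slice rotated none (some 4) == PySem.List.slice list1 none (some 4)
    else false

-- ===== PRECONDITION & SPEC =====
-- Pre_ excludes exactly the inputs where A raises IndexError: empty list1 (list1[0]),
-- and the case where the guard passes but the lists are shorter than 4 (the range(4) scan).
def Pre_AreListsEquiv (list1 : List Int) (list2 : List Int) : Prop :=
  list1 ≠ [] ∧ ((list1.getD 0 0 ∈ list2 ∧ list1.length = list2.length) → 4 ≤ list1.length)
instance (list1 : List Int) (list2 : List Int) : Decidable (Pre_AreListsEquiv list1 list2) := by unfold Pre_AreListsEquiv; infer_instance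

def pvWitness_AreListsEquiv : List Int × List Int := ([1, 2, 3, 4], [3, 4, 1, 2])

def Spec_AreListsEquiv (list1 : List Int) (list2 : List Int) (out : Bool) : Prop := out = AreListsEquiv_alt list1 list2
instance (list1 : List Int) (list2 : List Int) (out : Bool) : Decidable (Spec_AreListsEquiv list1 list2 out) := by unfold Spec_AreListsEquiv; infer_instance

-- ===== CLAIM (what is proved, stated in full; the proofs are below) =====
def Claim_equal_AreListsEquiv : Prop := ∀ (list1 : List Int) (list2 : List Int), Dom_AreListsEquiv list1 list2 → Pre_AreListsEquiv list1 list2 → Spec_AreListsEquiv list1 list2 (AreListsEquiv list1 list2)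
-- ===== LEMMAS AND PROOFS =====

theorem rotLoop_spec (x : Int) : ∀ (a b : List Int) (fuel : Nat), x ∉ a → a.length ≤ fuel →
    rotLoop x (a ++ x :: b) fuel = x :: (b ++ a) := by
  intro a
  induction a with
  | nil => intro b fuel _ _; cases fuel <;> simp [rotLoop]
  | cons y a' ih =>
    intro b fuel hmem hlen
    simp only [List.mem_cons, not_or] at hmem
    match fuel with
    | f + 1 =>
      simp only [List.cons_append, rotLoop, if_pos (Ne.symm hmem.1 : y ≠ x)]
      have he : (a' ++ x :: b) ++ [y] = a' ++ x :: (b ++ [y]) := by simp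
      rw [he, ih (b ++ [y]) f hmem.2 (by simpa using Nat.le_of_succ_le_succ hlen)]
      simp

theorem cmp4_spec (l1 l2 : List Int) (h1 : 4 ≤ l1.length) (h2 : 4 ≤ l2.length) :
    cmp4 l1 l2 0 = (l2.take 4 == l1.take 4) := by
  rcases l1 with _|⟨a1,_|⟨a2,_|⟨a3,_|⟨a4,r1⟩⟩⟩⟩ <;> simp at h1
  rcases l2 with _|⟨b1,_|⟨b2,_|⟨b3,_|⟨b4,r2⟩⟩⟩⟩ <;> simp at h2
  have step : ∀ (u v : List Int) (i : Nat) (a b : Int), i < 4 →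
      PySem.List.pyGet? v (i : Int) = some a → PySem.List.pyGet? u (i : Int) = some b →
      cmp4 u v i = (a == b && cmp4 u v (i + 1)) := by
    intro u v i a b hi ha hb
    rw [cmp4, if_pos hi, ha, hb]
    by_cases h : a = b <;> simp [h]
  have stop : ∀ (u v : List Int), cmp4 u v 4 = true := by
    intro u v; rw [cmp4]; simp
  rw [step _ _ 0 b1 a1 (by norm_num) (by simp [pysem]) (by simp [pysem]),
      step _ _ 1 b2 a2 (by norm_num) (by simp [pysem]) (by simp [pysem]),
      step _ _ 2 b3 a3 (by norm_num) (by simp [pysem]) (by simp [pysem]),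
      step _ _ 3 b4 a4 (by norm_num) (by simp [pysem]) (by simp [pysem]),
      stop]
  simp [List.take]

-- ===== VERDICT (by name: the statement is the Claim_ definition above) =====
theorem AreListsEquiv_spec : Claim_equal_AreListsEquiv := by
  intro l1 l2 _ hpre
  unfold Pre_AreListsEquiv at hpre
  unfold Spec_AreListsEquiv
  match l1 with
  | [] => rfl
  | x :: t =>
    show (if l2.contains x && ((x::t).length == l2.length) then
            cmp4 (x::t) (rotLoop x l2 l2.length) 0 else false)
        = (if l2.contains x && ((x::t).length == l2.length) then
            let k : Nat := (PySem.List.index? l2 x).getD 0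
            let rotated := PySem.List.slice l2 (some (k : Int)) none ++ PySem.List.slice l2 none (some (k : Int))
            PySem.List.slice rotated none (some 4) == PySem.List.slice (x::t) none (some 4)
          else false)
    by_cases hg : (l2.contains x && ((x::t).length == l2.length)) = true
    · rw [if_pos hg, if_pos hg]
      obtain ⟨hc, hl⟩ := (Bool.and_eq_true _ _).mp hg
      have hx : x ∈ l2 := by simpa using hc
      have hlen : (x::t).length = l2.length := by simpa using hl
      have h4 : 4 ≤ (x::t).length := hpre.2 ⟨by simpa using hx, hlen⟩
      obtain ⟨k, hk⟩ := Option.isSome_iff_exists.1 ((PySem.List.index?_isSome_iff l2 x).2 hx)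
      obtain ⟨pre, suf, hsplit, hklen, hnot⟩ := (PySem.List.index?_eq_some_iff l2 x k).1 hk
      rw [hk]
      simp only [Option.getD_some]
      rw [PySem.List.slice_from_natCast, PySem.List.slice_to_natCast]
      subst hsplit hklen
      rw [List.drop_left, List.take_left]
      have hrot : rotLoop x (pre ++ x :: suf) (pre ++ x :: suf).length = x :: (suf ++ pre) :=
        rotLoop_spec x pre suf (pre ++ x :: suf).length hnot (by simp)
      rw [hrot]
      have s4 : ∀ xs : List Int, PySem.List.slice xs none (some 4) = xs.take 4 := by
        intro xs; simp [pysem]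
      rw [s4, s4]
      have := cmp4_spec (x::t) (x :: (suf ++ pre)) h4 (by simp at h4 hlen ⊢; omega)
      rw [this]
      norm_num
    · rw [if_neg hg, if_neg hg]
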